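-- pv_equiv track=rewrite | github.com/eeeXun/homework | semester3/algorithm1-1/demo4/counting.py | sorting_status
-- ===== SOURCE A (Python) =====
-- def bubbleSort_status(sorted_status):
--     for i in range(len(sorted_status)-1,-1,-1):
--         for j in range(i):
--             if sorted_status[j]>sorted_status[j+1]:
--                 sorted_status[j],sorted_status[j+1]=sorted_status[j+1],sorted_status[j]
--
-- def sorting_status(status_count):
--     sorted_status=[]
--     sorted_count=[]
--     sorted_status_count={}
--     for i in status_count:
--         sorted_status.append(i)
--     bubbleSort_status(sorted_status)
--     for i in sorted_status:
--         sorted_count.append(status_count[i])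
--         # sorted_status_count[i]=status_count[i]
--     for i in range(1,len(sorted_status)):
--         sorted_count[i]+=sorted_count[i-1]
--     for i in range(len(sorted_status)):
--         sorted_status_count[sorted_status[i]]=sorted_count[i]
--
--     return sorted_status_count
-- ===== SOURCE B (Python) =====
-- def sorting_status(status_count):
--     result = {}
--     total = 0
--     for key in sorted(status_count):
--         total += status_count[key]
--         result[key] = total
--     return result
-- ===== Notes on version B (the rewrite author's own statement) =====
-- stated objective: faster
-- what changed: Replaces the hand-written index-swapping bubble sort plus three separate passes (copy keys, build a counts list, in-place prefix-sum it, zip it back into a dict) by one sorted() call and a single accumulating traversal with a scalar running total that never materialises the counts list.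
import Mathlib
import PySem

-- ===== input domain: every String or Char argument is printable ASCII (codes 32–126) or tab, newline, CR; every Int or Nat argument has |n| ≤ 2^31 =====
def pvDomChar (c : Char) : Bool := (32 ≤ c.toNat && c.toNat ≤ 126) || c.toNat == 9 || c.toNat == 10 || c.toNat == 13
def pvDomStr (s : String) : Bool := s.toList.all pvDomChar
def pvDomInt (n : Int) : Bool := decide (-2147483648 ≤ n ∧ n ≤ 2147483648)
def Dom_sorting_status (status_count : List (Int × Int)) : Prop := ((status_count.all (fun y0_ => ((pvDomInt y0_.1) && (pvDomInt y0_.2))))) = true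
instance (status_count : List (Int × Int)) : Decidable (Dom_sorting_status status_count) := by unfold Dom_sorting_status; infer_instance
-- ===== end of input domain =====

-- B replaces A's hand-written bubble sort and its three separate passes (copy the keys,
-- build a counts list, prefix-sum it in place, zip it back into a dict) by one sorted()
-- call and a single pass with a scalar running total.

-- ===== PORT A =====
-- one inner-loop body of bubbleSort_status: compare sorted_status[j] with sorted_status[j+1], swap if out of order
def pvBubbleStep (c : List Int) (j : Int) : List Int :=
  let a := PySem.List.pyGetD c j 0
  let b := PySem.List.pyGetD c (j + 1) 0
  if b < a then PySem.List.pySetD (PySem.List.pySetD c j b) (j + 1) a else c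

-- bubbleSort_status (every index produced by the ranges is in bounds, so the pyGetD/pySetD defaults never fire)
def bubbleSort_status (sorted_status : List Int) : List Int :=
  (PySem.List.pyRange ((sorted_status.length : Int) - 1) (-1) (-1)).foldl
    (fun c i => (PySem.List.pyRange 0 i 1).foldl pvBubbleStep c) sorted_status

-- 'status_count[i]' is a dict lookup whose key always comes from the dict itself, so getD's default is never used
def sorting_status (status_count : List (Int × Int)) : List (Int × Int) :=
  let d := PySem.Dict.ofList status_count
  let sorted_status := d.keys.foldl (fun acc i => acc ++ [i]) []
  let sorted_status := bubbleSort_status sorted_status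
  let sorted_count := sorted_status.foldl (fun acc i => acc ++ [d.getD i 0]) []
  let sorted_count :=
    (PySem.List.pyRange 1 (sorted_status.length : Int) 1).foldl
      (fun c i => PySem.List.pySetD c i (PySem.List.pyGetD c i 0 + PySem.List.pyGetD c (i - 1) 0))
      sorted_count
  let res :=
    (PySem.List.pyRange 0 (sorted_status.length : Int) 1).foldl
      (fun (dd : PySem.Dict Int Int) i =>
        dd.insert (PySem.List.pyGetD sorted_status i 0) (PySem.List.pyGetD sorted_count i 0))
      PySem.Dict.empty
  res.items

-- ===== PORT B =====
def sorting_status_alt (status_count : List (Int × Int)) : List (Int × Int) :=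
  let d := PySem.Dict.ofList status_count
  let r :=
    (PySem.List.sorted d.keys (fun k => k) false).foldl
      (fun (st : PySem.Dict Int Int × Int) k =>
        let total := st.2 + d.getD k 0
        (st.1.insert k total, total))
      (PySem.Dict.empty, 0)
  r.1.items

-- ===== PRECONDITION & SPEC =====
def Spec_sorting_status (status_count : List (Int × Int)) (out : List (Int × Int)) : Prop := out = sorting_status_alt status_count
instance (status_count : List (Int × Int)) (out : List (Int × Int)) : Decidable (Spec_sorting_status status_count out) := by unfold Spec_sorting_status; infer_instance

-- ===== CLAIM (what is proved, stated in full; the proofs are below) =====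
def Claim_equal_sorting_status : Prop := ∀ (status_count : List (Int × Int)), Dom_sorting_status status_count → Spec_sorting_status status_count (sorting_status status_count)

-- ===== LEMMAS AND PROOFS =====

-- Nat-indexed versions of port A's loop bodies
def pvBubbleStepN (c : List Int) (n : Nat) : List Int :=
  let a := c.getD n 0
  let b := c.getD (n + 1) 0
  if b < a then (c.set n b).set (n + 1) a else c

def pvInnerN (c : List Int) (i : Nat) : List Int :=
  (List.range i).foldl pvBubbleStepN c

def pvRunOuter : List Int → Nat → List Int
  | c, 0 => c
  | c, m + 1 => pvRunOuter (pvInnerN c m) m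

-- one bubble pass, structurally
def pvBpass : List Int → List Int
  | [] => []
  | [x] => [x]
  | x :: y :: t => if y < x then y :: pvBpass (x :: t) else x :: pvBpass (y :: t)
termination_by l => l.length
decreasing_by all_goals simp

-- running cumulative sums starting from t
def pvSums (t : Int) : List Int → List Int
  | [] => []
  | x :: xs => (t + x) :: pvSums (t + x) xs

def pvStepPN (c : List Int) (n : Nat) : List Int :=
  c.set n (c.getD n 0 + c.getD (n - 1) 0)

lemma pvBubbleStep_cast (c : List Int) (k : Nat) : pvBubbleStep c (k : Int) = pvBubbleStepN c k := by
  have h1 : (k : Int) + 1 = ((k + 1 : Nat) : Int) := by push_cast; ring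
  unfold pvBubbleStep pvBubbleStepN
  rw [h1]
  simp only [PySem.List.pyGetD_natCast, PySem.List.pySetD_natCast]

lemma pvInner_cast (c : List Int) (n : Nat) :
    (PySem.List.pyRange 0 (n : Int) 1).foldl pvBubbleStep c = pvInnerN c n := by
  rw [PySem.List.pyRange_one]
  simp only [sub_zero, Int.toNat_natCast, List.foldl_map, zero_add, pvInnerN]
  congr 1
  funext acc x
  exact pvBubbleStep_cast acc x

lemma pvOuter_eq (n : Nat) (c : List Int) :
    (PySem.List.pyRange ((n : Int) - 1) (-1) (-1)).foldl
      (fun c i => (PySem.List.pyRange 0 i 1).foldl pvBubbleStep c) c = pvRunOuter c n := by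
  induction n generalizing c with
  | zero =>
    rw [PySem.List.pyRange_neg_one_eq_nil (by norm_num)]
    rfl
  | succ m ih =>
    rw [PySem.List.pyRange_neg_one_cons (by push_cast; omega)]
    simp only [List.foldl_cons]
    have h2 : ((m + 1 : Nat) : Int) - 1 = (m : Int) := by push_cast; ring
    rw [h2, pvInner_cast]
    rw [show pvRunOuter c (m + 1) = pvRunOuter (pvInnerN c m) m from rfl]
    exact ih _

lemma pvBpass_length (l : List Int) : (pvBpass l).length = l.length := by
  fun_induction pvBpass l <;> simp_all

lemma pvBpass_perm (l : List Int) : (pvBpass l).Perm l := by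
  fun_induction pvBpass l with
  | case1 => rfl
  | case2 => rfl
  | case3 x y t h ih =>
    exact (List.Perm.cons y ih).trans (List.Perm.swap x y t)
  | case4 x y t h ih =>
    exact List.Perm.cons x ih

lemma pvBpass_max_last (l : List Int) (h : l ≠ []) :
    ∃ t m, pvBpass l = t ++ [m] ∧ ∀ x ∈ l, x ≤ m := by
  fun_induction pvBpass l with
  | case1 => exact absurd rfl h
  | case2 x => exact ⟨[], x, rfl, by simp⟩
  | case3 x y t hlt ih =>
    obtain ⟨t', m, he, hm⟩ := ih (by simp)
    refine ⟨y :: t', m, by simp [he], ?_⟩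
    intro z hz
    simp only [List.mem_cons] at hz
    rcases hz with rfl | rfl | hz
    · exact hm z (by simp)
    · exact le_trans hlt.le (hm x (by simp))
    · exact hm z (by simp [hz])
  | case4 x y t hlt ih =>
    obtain ⟨t', m, he, hm⟩ := ih (by simp)
    refine ⟨x :: t', m, by simp [he], ?_⟩
    intro z hz
    simp only [List.mem_cons] at hz
    rcases hz with rfl | rfl | hz
    · exact le_trans (not_lt.mp hlt) (hm y (by simp))
    · exact hm z (by simp)
    · exact hm z (by simp [hz])

lemma pvBubbleStepN_cons (a : Int) (c : List Int) (n : Nat) :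
    pvBubbleStepN (a :: c) (n + 1) = a :: pvBubbleStepN c n := by
  simp only [pvBubbleStepN, List.getD_cons_succ, List.set_cons_succ]
  split_ifs <;> rfl

lemma pv_foldl_head_invariant {α β : Type} (f g : List α → β → List α) (a : α)
    (H : ∀ c n, f (a :: c) n = a :: g c n) :
    ∀ (l : List β) (c : List α), l.foldl f (a :: c) = a :: l.foldl g c := by
  intro l
  induction l with
  | nil => intro c; rfl
  | cons b l ih => intro c; simp only [List.foldl_cons, H]; exact ih _

lemma pvInnerN_eq_bpass (i : Nat) (c : List Int) (h : i + 1 ≤ c.length) :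
    pvInnerN c i = pvBpass (c.take (i + 1)) ++ c.drop (i + 1) := by
  induction i generalizing c with
  | zero =>
    match c, h with
    | x :: t, _ => simp [pvInnerN, pvBpass]
  | succ m ih =>
    match c, h with
    | x :: y :: t, h =>
      have hfirst : pvBubbleStepN (x :: y :: t) 0
          = (if y < x then y else x) :: (if y < x then x else y) :: t := by
        simp only [pvBubbleStepN, List.getD_cons_zero, List.getD_cons_succ]
        split_ifs <;> rfl
      rw [pvInnerN, List.range_succ_eq_map, List.foldl_cons, List.foldl_map, hfirst]
      rw [pv_foldl_head_invariant _ pvBubbleStepN _ (fun c n => pvBubbleStepN_cons _ c n)]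
      rw [show (List.range m).foldl pvBubbleStepN ((if y < x then x else y) :: t) = pvInnerN ((if y < x then x else y) :: t) m from rfl]
      rw [ih ((if y < x then x else y) :: t) (by simp at h ⊢; omega)]
      by_cases hyx : y < x
      · simp only [hyx, if_pos]
        rw [show pvBpass ((x :: y :: t).take (m+1+1)) = pvBpass (x :: y :: t.take m) from by simp]
        rw [show pvBpass (x :: y :: t.take m) = y :: pvBpass (x :: t.take m) from by rw [pvBpass, if_pos hyx]]
        simp
      · simp only [hyx, if_false]
        rw [show pvBpass ((x :: y :: t).take (m+1+1)) = pvBpass (x :: y :: t.take m) from by simp]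
        rw [show pvBpass (x :: y :: t.take m) = x :: pvBpass (y :: t.take m) from by rw [pvBpass, if_neg hyx]]
        simp

lemma pvRunOuter_sorted (n : Nat) : ∀ (c : List Int), n ≤ c.length →
    (c.drop n).Pairwise (· ≤ ·) →
    (∀ x ∈ c.take n, ∀ y ∈ c.drop n, x ≤ y) →
    (pvRunOuter c n).Perm c ∧ (pvRunOuter c n).Pairwise (· ≤ ·) := by
  induction n with
  | zero =>
    intro c _ hs _
    exact ⟨List.Perm.refl c, by simpa using hs⟩
  | succ m ih =>
    intro c hn hs hb
    have hm1 : m + 1 ≤ c.length := hn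
    have hc' : pvInnerN c m = pvBpass (c.take (m + 1)) ++ c.drop (m + 1) :=
      pvInnerN_eq_bpass m c hm1
    obtain ⟨t', mx, hbp, hmx⟩ := pvBpass_max_last (c.take (m + 1))
      (by
        intro he
        have h0 := congrArg List.length he
        rw [List.length_take] at h0
        simp only [List.length_nil, Nat.min_eq_left hm1] at h0
        omega)
    have hlt' : t'.length = m := by
      have := pvBpass_length (c.take (m + 1))
      rw [hbp] at this; simp at this
      have h2 : (c.take (m+1)).length = m + 1 := by rw [List.length_take]; exact Nat.min_eq_left hm1
      omega
    have hsplit : pvInnerN c m = t' ++ ([mx] ++ c.drop (m + 1)) := by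
      rw [hc', hbp, List.append_assoc]
    set c' := pvInnerN c m with hc'def
    have hperm : c'.Perm c := by
      rw [hc']
      calc (pvBpass (c.take (m+1)) ++ c.drop (m+1)).Perm (c.take (m+1) ++ c.drop (m+1)) :=
            (pvBpass_perm _).append (List.Perm.refl _)
        _ = c := List.take_append_drop (m+1) c
    have htake : c'.take m = t' := by
      rw [hsplit, ← hlt', List.take_left]
    have hdrop : c'.drop m = mx :: c.drop (m + 1) := by
      rw [hsplit, ← hlt', List.drop_left]
      rfl
    have hmem_bp : ∀ x ∈ t' ++ [mx], x ∈ c.take (m + 1) := by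
      intro x hx
      exact ((pvBpass_perm (c.take (m+1))).mem_iff.mp (hbp ▸ hx))
    have hmxle : ∀ y ∈ c.drop (m + 1), mx ≤ y := by
      intro y hy
      exact hb mx (hmem_bp mx (by simp)) y hy
    have hs' : (c'.drop m).Pairwise (· ≤ ·) := by
      rw [hdrop]
      exact List.Pairwise.cons hmxle hs
    have hb' : ∀ x ∈ c'.take m, ∀ y ∈ c'.drop m, x ≤ y := by
      intro x hx y hy
      rw [htake] at hx
      rw [hdrop] at hy
      rcases List.mem_cons.mp hy with rfl | hy
      · exact hmx x (hmem_bp x (by simp [hx]))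
      · exact hb x (hmem_bp x (by simp [hx])) y hy
    have hlen' : m ≤ c'.length := by
      rw [hperm.length_eq]; omega
    have := ih c' hlen' hs' hb'
    exact ⟨(show pvRunOuter c (m+1) = pvRunOuter c' m from rfl) ▸ this.1.trans hperm,
      (show pvRunOuter c (m+1) = pvRunOuter c' m from rfl) ▸ this.2⟩

lemma pvBubble_eq_sorted (ks : List Int) (h : ks.Nodup) :
    bubbleSort_status ks = PySem.List.sorted ks (fun k => k) false := by
  unfold bubbleSort_status
  rw [pvOuter_eq ks.length ks]
  have hres := pvRunOuter_sorted ks.length ks le_rfl (by simp) (by simp)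
  have hnd : (pvRunOuter ks ks.length).Nodup := hres.1.nodup_iff.mpr h
  have hne : (pvRunOuter ks ks.length).Pairwise (· ≠ ·) := hnd
  have hlt : (pvRunOuter ks ks.length).Pairwise (fun a b => (fun (k : Int) => k) a < (fun (k : Int) => k) b) :=
    (List.pairwise_and_iff.mpr ⟨hres.2, hne⟩).imp (fun {a b} hab => lt_of_le_of_ne hab.1 hab.2)
  exact (PySem.List.sorted_eq_of_perm_of_pairwise_lt ks (pvRunOuter ks ks.length) (fun k => k) hres.1 hlt).symm

lemma pvSums_length (t : Int) (l : List Int) : (pvSums t l).length = l.length := by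
  induction l generalizing t with
  | nil => rfl
  | cons x xs ih => simp [pvSums, ih]

lemma pvStepPN_cons (a : Int) (c : List Int) (n : Nat) :
    pvStepPN (a :: c) (n + 2) = a :: pvStepPN c (n + 1) := by
  simp [pvStepPN]

lemma pvSums_aux (l : List Int) (a : Int) :
    (List.range l.length).foldl (fun c k => pvStepPN c (k + 1)) (a :: l) = a :: pvSums a l := by
  induction l generalizing a with
  | nil => rfl
  | cons x t ih =>
    have hfirst : pvStepPN (a :: x :: t) 1 = a :: (x + a) :: t := by
      simp [pvStepPN]
    simp only [List.length_cons, List.range_succ_eq_map, List.foldl_cons, List.foldl_map,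
      Nat.zero_add, hfirst]
    rw [pv_foldl_head_invariant (fun c k => pvStepPN c (k + 1 + 1)) (fun c k => pvStepPN c (k + 1)) a
      (fun c n => pvStepPN_cons a c n)]
    rw [ih (x + a)]
    simp [pvSums, add_comm]

lemma pvPrefix_eq (l : List Int) :
    (PySem.List.pyRange 1 (l.length : Int) 1).foldl
      (fun c i => PySem.List.pySetD c i (PySem.List.pyGetD c i 0 + PySem.List.pyGetD c (i - 1) 0)) l
    = pvSums 0 l := by
  match l with
  | [] => rfl
  | x :: t =>
    have hlen : ((x :: t).length : Int) = (t.length : Int) + 1 := by simp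
    rw [hlen, PySem.List.pyRange_one]
    have hT : ((t.length : Int) + 1 - 1).toNat = t.length := by omega
    rw [hT, List.foldl_map]
    have hstep : ∀ (c : List Int) (k : Nat),
        PySem.List.pySetD c (1 + (k : Int)) (PySem.List.pyGetD c (1 + (k : Int)) 0 + PySem.List.pyGetD c (1 + (k : Int) - 1) 0)
        = pvStepPN c (k + 1) := by
      intro c k
      have h2 : (1 : Int) + (k : Int) - 1 = ((k : Nat) : Int) := by omega
      have h1 : (1 : Int) + (k : Int) = ((k + 1 : Nat) : Int) := by omega
      rw [h2, h1]
      simp only [PySem.List.pyGetD_natCast, PySem.List.pySetD_natCast]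
      simp [pvStepPN]
    have hfun : (fun (c : List Int) (y : Nat) =>
        PySem.List.pySetD c (1 + (y : Int)) (PySem.List.pyGetD c (1 + (y : Int)) 0 + PySem.List.pyGetD c (1 + (y : Int) - 1) 0))
        = fun c k => pvStepPN c (k + 1) := funext fun c => funext fun k => hstep c k
    rw [hfun, pvSums_aux]
    simp [pvSums]

lemma pvZipFold_eq (xs : List Int) : ∀ (ys : List Int) (dd : PySem.Dict Int Int), ys.length = xs.length →
    (List.range xs.length).foldl (fun dd k => dd.insert (xs.getD k 0) (ys.getD k 0)) dd
    = (xs.zip ys).foldl (fun dd p => dd.insert p.1 p.2) dd := by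
  induction xs with
  | nil => intro ys dd _; rfl
  | cons x xs ih =>
    intro ys dd hl
    match ys, hl with
    | y :: ys, hl =>
      simp only [List.length_cons, List.range_succ_eq_map, List.foldl_cons, List.foldl_map,
        List.getD_cons_zero, List.getD_cons_succ, List.zip_cons_cons]
      exact ih ys _ (by simpa using hl)

lemma pvInsertFold_cast (xs ys : List Int) (dd : PySem.Dict Int Int) :
    (PySem.List.pyRange 0 (xs.length : Int) 1).foldl
      (fun dd i => dd.insert (PySem.List.pyGetD xs i 0) (PySem.List.pyGetD ys i 0)) dd
    = (List.range xs.length).foldl (fun dd k => dd.insert (xs.getD k 0) (ys.getD k 0)) dd := by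
  rw [PySem.List.pyRange_one]
  simp only [sub_zero, Int.toNat_natCast, List.foldl_map, zero_add,
    PySem.List.pyGetD_natCast]

lemma pvAltFold_eq (f : Int → Int) (ss : List Int) :
    ∀ (t : Int) (dd : PySem.Dict Int Int),
      (ss.foldl (fun (st : PySem.Dict Int Int × Int) k =>
        (st.1.insert k (st.2 + f k), st.2 + f k)) (dd, t)).1
      = (ss.zip (pvSums t (ss.map f))).foldl (fun dd p => dd.insert p.1 p.2) dd := by
  induction ss with
  | nil => intro t dd; rfl
  | cons k ss ih =>
    intro t dd
    simp only [List.foldl_cons, List.map_cons, pvSums, List.zip_cons_cons]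
    exact ih (t + f k) _

-- ===== VERDICT (by name: the statement is the Claim_ definition above) =====
theorem sorting_status_spec : Claim_equal_sorting_status := by
  intro sc _
  show sorting_status sc = sorting_status_alt sc
  unfold sorting_status sorting_status_alt
  dsimp only
  set d := PySem.Dict.ofList sc with hd
  have hks : d.keys.foldl (fun acc i => acc ++ [i]) [] = d.keys := by
    simpa using PySem.List.foldl_append_singleton d.keys []
  rw [hks]
  set ss := bubbleSort_status d.keys with hss
  have hsorted : ss = PySem.List.sorted d.keys (fun k => k) false :=
    pvBubble_eq_sorted d.keys (PySem.Dict.nodup_keys_ofList sc)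
  have hcs : ss.foldl (fun acc i => acc ++ [d.getD i 0]) [] = ss.map (fun i => d.getD i 0) := by
    simpa using PySem.List.foldl_append_singleton_eq_map (fun i => d.getD i 0) ss []
  rw [hcs]
  have hlencs : ((ss.length : Int)) = ((ss.map (fun i => d.getD i 0)).length : Int) := by simp
  rw [hlencs, pvPrefix_eq]
  rw [← hlencs]
  rw [pvInsertFold_cast ss (pvSums 0 (ss.map (fun i => d.getD i 0))) PySem.Dict.empty]
  rw [pvZipFold_eq ss (pvSums 0 (ss.map (fun i => d.getD i 0))) PySem.Dict.empty
    (by rw [pvSums_length]; simp)]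
  rw [← hsorted]
  have halt := pvAltFold_eq (fun i => d.getD i 0) ss 0 PySem.Dict.empty
  simp only [← halt]
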